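-- pv_equiv track=rewrite | github.com/RicheByte/fsociety-reborn | crypto/hashcat_automation.py | detect_hash_type
-- ===== SOURCE A (Python) =====
-- def detect_hash_type(hash_value):
--     hash_len = len(hash_value)
--
--     if hash_len == 32 and all(c in '0123456789abcdefABCDEF' for c in hash_value):
--         return '0', 'MD5'
--     elif hash_len == 40 and all(c in '0123456789abcdefABCDEF' for c in hash_value):
--         return '100', 'SHA1'
--     elif hash_len == 64 and all(c in '0123456789abcdefABCDEF' for c in hash_value):
--         return '1400', 'SHA256'
--     elif hash_len == 128 and all(c in '0123456789abcdefABCDEF' for c in hash_value):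
--         return '1700', 'SHA512'
--     elif hash_value.startswith('$2a$') or hash_value.startswith('$2b$') or hash_value.startswith('$2y$'):
--         return '3200', 'bcrypt'
--     elif hash_value.startswith('$6$'):
--         return '1800', 'sha512crypt'
--     elif hash_value.startswith('$5$'):
--         return '7400', 'sha256crypt'
--     elif hash_value.startswith('$1$'):
--         return '500', 'md5crypt'
--     elif ':' in hash_value and len(hash_value.split(':')) >= 2:
--         return '1000', 'NTLM'
--     else:
--         return None, 'Unknown'
-- ===== SOURCE B (Python) =====
-- _HEX = '0123456789abcdefABCDEF'
-- _TYPES_BY_LEN = {32: ('0', 'MD5'), 40: ('100', 'SHA1'),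
--                  64: ('1400', 'SHA256'), 128: ('1700', 'SHA512')}
-- _TYPES_BY_PREFIX = {'$2a$': ('3200', 'bcrypt'), '$2b$': ('3200', 'bcrypt'),
--                     '$2y$': ('3200', 'bcrypt'), '$6$': ('1800', 'sha512crypt'),
--                     '$5$': ('7400', 'sha256crypt'), '$1$': ('500', 'md5crypt')}
--
--
-- def detect_hash_type(hash_value):
--     # One pass over the string builds a summary (length, all-hex?, has-colon?,
--     # first four chars); the classification is then decided from the summary
--     # alone by two dict lookups, instead of A's ten staged scans of the string.
--     n = 0
--     all_hex = True
--     has_colon = False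
--     head = ''
--     for c in hash_value:
--         n += 1
--         if c not in _HEX:
--             all_hex = False
--         if c == ':':
--             has_colon = True
--         if n <= 4:
--             head += c
--     if all_hex:
--         t = _TYPES_BY_LEN.get(n)
--         if t is not None:
--             return t
--     t = _TYPES_BY_PREFIX.get(head) or _TYPES_BY_PREFIX.get(head[:3])
--     if t is not None:
--         return t
--     return ('1000', 'NTLM') if has_colon else (None, 'Unknown')
-- ===== Notes on version B (the rewrite author's own statement) =====
-- stated objective: alternative
-- what changed: B makes a single fold over the string that accumulates a summary (length, all-hex flag, colon flag, first four characters) and then classifies from that summary alone via two dict lookups, instead of A's chain of up to ten separate scans of the string (four all() passes, six startswith, a colon membership test and a split).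
import Mathlib
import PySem

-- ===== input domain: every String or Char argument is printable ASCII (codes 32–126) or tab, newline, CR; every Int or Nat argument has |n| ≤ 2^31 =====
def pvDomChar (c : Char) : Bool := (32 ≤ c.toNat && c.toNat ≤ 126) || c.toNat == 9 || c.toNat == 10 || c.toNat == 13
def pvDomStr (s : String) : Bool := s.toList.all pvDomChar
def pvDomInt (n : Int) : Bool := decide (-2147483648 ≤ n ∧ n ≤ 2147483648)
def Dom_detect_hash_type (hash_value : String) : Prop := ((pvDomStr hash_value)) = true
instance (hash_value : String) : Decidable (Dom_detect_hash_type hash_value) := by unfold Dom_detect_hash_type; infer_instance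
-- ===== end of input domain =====

-- B folds once over the string into a summary (length, all-hex, has-colon, first four
-- chars) and classifies from the summary by two dict lookups, instead of A's chain of
-- separate scans (objective: alternative single-pass decomposition, same cost).

-- ===== PORT A =====
def detect_hash_type (hash_value : String) : Option String × String :=
  let hash_len := PySem.Str.len hash_value
  if hash_len == 32 && hash_value.toList.all (fun c => PySem.Str.isIn (String.ofList [c]) "0123456789abcdefABCDEF") then
    (some "0", "MD5")
  else if hash_len == 40 && hash_value.toList.all (fun c => PySem.Str.isIn (String.ofList [c]) "0123456789abcdefABCDEF") then
    (some "100", "SHA1")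
  else if hash_len == 64 && hash_value.toList.all (fun c => PySem.Str.isIn (String.ofList [c]) "0123456789abcdefABCDEF") then
    (some "1400", "SHA256")
  else if hash_len == 128 && hash_value.toList.all (fun c => PySem.Str.isIn (String.ofList [c]) "0123456789abcdefABCDEF") then
    (some "1700", "SHA512")
  else if PySem.Str.startswith hash_value "$2a$" || PySem.Str.startswith hash_value "$2b$" || PySem.Str.startswith hash_value "$2y$" then
    (some "3200", "bcrypt")
  else if PySem.Str.startswith hash_value "$6$" then
    (some "1800", "sha512crypt")
  else if PySem.Str.startswith hash_value "$5$" then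
    (some "7400", "sha256crypt")
  else if PySem.Str.startswith hash_value "$1$" then
    (some "500", "md5crypt")
  else if PySem.Str.isIn ":" hash_value && decide (2 ≤ (PySem.Chars.splitOn hash_value.toList ":".toList).length) then
    (some "1000", "NTLM")
  else
    (none, "Unknown")

-- ===== PORT B =====
def pvIsHex (c : Char) : Bool := PySem.Str.isIn (String.ofList [c]) "0123456789abcdefABCDEF"

def pvLenTypes : PySem.Dict Int (Option String × String) :=
  PySem.Dict.ofList [(32, (some "0", "MD5")), (40, (some "100", "SHA1")),
                     (64, (some "1400", "SHA256")), (128, (some "1700", "SHA512"))]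

-- keys kept as List Char: Python strings are ported on the code-point list side
def pvPrefixTypes : PySem.Dict (List Char) (Option String × String) :=
  PySem.Dict.ofList [("$2a$".toList, (some "3200", "bcrypt")), ("$2b$".toList, (some "3200", "bcrypt")),
                     ("$2y$".toList, (some "3200", "bcrypt")), ("$6$".toList, (some "1800", "sha512crypt")),
                     ("$5$".toList, (some "7400", "sha256crypt")), ("$1$".toList, (some "500", "md5crypt"))]

-- one iteration of B's for-loop: state = (n, all_hex, has_colon, head)
def pvScanStep (st : Int × Bool × Bool × List Char) (c : Char) : Int × Bool × Bool × List Char :=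
  let n := st.1 + 1
  let all_hex := if !pvIsHex c then false else st.2.1
  let has_colon := if c == ':' then true else st.2.2.1
  let head := if n ≤ 4 then st.2.2.2 ++ [c] else st.2.2.2
  (n, all_hex, has_colon, head)

def detect_hash_type_alt (hash_value : String) : Option String × String :=
  let st := hash_value.toList.foldl pvScanStep (0, true, false, [])
  let fromLen : Option (Option String × String) :=
    if st.2.1 then PySem.Dict.get? pvLenTypes st.1 else none
  match fromLen with
  | some t => t
  | none =>
    -- head[:3] is PySem.List.slice head none (some 3)
    match (PySem.Dict.get? pvPrefixTypes st.2.2.2).orElse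
            (fun _ => PySem.Dict.get? pvPrefixTypes (PySem.List.slice st.2.2.2 none (some 3))) with
    | some t => t
    | none => if st.2.2.1 then (some "1000", "NTLM") else (none, "Unknown")

-- ===== PRECONDITION & SPEC =====
def Spec_detect_hash_type (hash_value : String) (out : Option String × String) : Prop := out = detect_hash_type_alt hash_value
instance (hash_value : String) (out : Option String × String) : Decidable (Spec_detect_hash_type hash_value out) := by unfold Spec_detect_hash_type; infer_instance

-- ===== CLAIM (what is proved, stated in full; the proofs are below) =====
def Claim_equal_detect_hash_type : Prop := ∀ (hash_value : String), Dom_detect_hash_type hash_value → Spec_detect_hash_type hash_value (detect_hash_type hash_value)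

-- ===== LEMMAS AND PROOFS =====

theorem scan_eq (l : List Char) : ∀ (k : Nat) (a h : Bool) (hd : List Char),
    l.foldl pvScanStep ((k : Int), a, h, hd) =
      ((k : Int) + l.length, (a && l.all pvIsHex), (h || l.any (· == ':')), hd ++ l.take (4 - k)) := by
  induction l with
  | nil => intro k a h hd; simp
  | cons c rest ih =>
    intro k a h hd
    have hstep : pvScanStep ((k : Int), a, h, hd) c =
        (((k+1 : Nat) : Int), (a && pvIsHex c), (h || (c == ':')), if k + 1 ≤ 4 then hd ++ [c] else hd) := by
      simp only [pvScanStep]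
      push_cast
      refine Prod.ext (by ring) (Prod.ext ?_ (Prod.ext ?_ ?_)) <;> simp only
      · cases hx : pvIsHex c <;> simp
      · cases hc : (c == ':') <;> simp
      · split_ifs with h1 h2 h2 <;> first | rfl | (exfalso; omega)
    rw [List.foldl_cons, hstep, ih (k+1) (a && pvIsHex c) (h || (c == ':')) _]
    refine Prod.ext ?_ (Prod.ext ?_ (Prod.ext ?_ ?_))
    · push_cast; simp; ring
    · simp [Bool.and_assoc]
    · simp [Bool.or_assoc]
    · by_cases hk : k + 1 ≤ 4
      · simp only [if_pos hk]
        have h4 : 4 - k = (4 - (k+1)) + 1 := by omega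
        rw [h4, List.take_succ_cons, List.append_assoc, List.singleton_append]
      · simp only [if_neg hk]
        have h4 : 4 - k = 0 ∧ 4 - (k+1) = 0 := by omega
        rw [h4.1, h4.2]; simp

theorem singleton_infix {a : Char} {l : List Char} : [a] <:+: l ↔ a ∈ l := by
  constructor
  · intro h; exact h.mem (by simp)
  · intro h; obtain ⟨p, q, rfl⟩ := List.mem_iff_append.mp h
    exact ⟨p, q, by simp⟩

theorem colon_any (s : String) : PySem.Str.isIn ":" s = s.toList.any (· == ':') := by
  rw [Bool.eq_iff_iff, PySem.Str.isIn_iff_infix]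
  rw [show (":".toList) = [':'] from rfl, singleton_infix]
  simp

theorem sw_take (l p : List Char) : PySem.Chars.startswith l p = (l.take p.length == p) := by
  rw [Bool.eq_iff_iff, beq_iff_eq]
  simp only [PySem.Chars.startswith, List.isPrefixOf_iff_prefix]
  rw [List.prefix_iff_eq_take]
  exact ⟨fun h => h.symm, fun h => h.symm⟩

theorem take43 (l p : List Char) (hp : p.length = 3) (h : l.take 4 = p) : l.take 3 = p := by
  have : l.take 3 = (l.take 4).take 3 := by rw [List.take_take]; norm_num
  rw [this, h, List.take_of_length_le (by omega)]

theorem go_zero (sep l cur : List Char) (acc : List (List Char)) :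
    PySem.Chars.splitOn.go sep 0 l cur acc = ((cur.reverse ++ l) :: acc).reverse := rfl

theorem go_succ_nil (sep cur : List Char) (fuel : Nat) (acc : List (List Char)) :
    PySem.Chars.splitOn.go sep (fuel+1) [] cur acc = (cur.reverse :: acc).reverse := rfl

theorem go_succ_cons (sep : List Char) (fuel : Nat) (c : Char) (rest cur : List Char) (acc : List (List Char)) :
    PySem.Chars.splitOn.go sep (fuel+1) (c::rest) cur acc =
      if sep.isPrefixOf (c::rest) then
        PySem.Chars.splitOn.go sep fuel (List.drop sep.length (c::rest)) [] (cur.reverse :: acc)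
      else PySem.Chars.splitOn.go sep fuel rest (c :: cur) acc := rfl

theorem go_len_ge (sep : List Char) : ∀ (fuel : Nat) (l cur : List Char) (acc : List (List Char)),
    acc.length + 1 ≤ (PySem.Chars.splitOn.go sep fuel l cur acc).length := by
  intro fuel
  induction fuel with
  | zero => intro l cur acc; rw [go_zero]; simp
  | succ n ih =>
    intro l cur acc
    cases l with
    | nil => rw [go_succ_nil]; simp
    | cons c rest =>
      rw [go_succ_cons]
      split
      · exact le_trans (by simp) (ih _ _ (cur.reverse :: acc))
      · exact ih _ _ _

theorem go_len_colon : ∀ (fuel : Nat) (l cur : List Char) (acc : List (List Char)),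
    ':' ∈ l → l.length ≤ fuel →
    acc.length + 2 ≤ (PySem.Chars.splitOn.go [':'] fuel l cur acc).length := by
  intro fuel
  induction fuel with
  | zero =>
    intro l cur acc hm hl
    have h0 : l = [] := List.eq_nil_of_length_eq_zero (by omega); subst h0; simp at hm
  | succ n ih =>
    intro l cur acc hm hl
    cases l with
    | nil => simp at hm
    | cons c rest =>
      rw [go_succ_cons]
      split
      · rename_i hp
        have := go_len_ge [':'] n (List.drop [':'].length (c::rest)) [] (cur.reverse :: acc)
        simp at this ⊢; omega
      · rename_i hp
        have hc : c ≠ ':' := by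
          intro h; subst h; exact hp (by simp [List.isPrefixOf])
        have hm' : ':' ∈ rest := by
          cases hm with
          | head => exact absurd rfl hc
          | tail _ h => exact h
        exact ih rest (c::cur) acc hm' (by simp at hl; omega)

theorem splitOn_colon_len (l : List Char) (h : ':' ∈ l) :
    2 ≤ (PySem.Chars.splitOn l [':']).length := by
  have := go_len_colon (l.length + 1) l [] [] h (by omega)
  simpa [PySem.Chars.splitOn] using this

theorem ntlm_cond (s : String) :
    (PySem.Str.isIn ":" s && decide (2 ≤ (PySem.Chars.splitOn s.toList ":".toList).length)) =
      PySem.Str.isIn ":" s := by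
  cases h : PySem.Str.isIn ":" s with
  | false => simp
  | true =>
    have hm : ':' ∈ s.toList := by
      have := (PySem.Str.isIn_iff_infix ":" s).mp h
      exact singleton_infix.mp (by simpa using this)
    simp [show (":".toList) = [':'] from rfl, splitOn_colon_len s.toList hm]

theorem lenTypes_eq : pvLenTypes = PySem.Dict.mk [(32, (some "0", "MD5")), (40, (some "100", "SHA1")),
    (64, (some "1400", "SHA256")), (128, (some "1700", "SHA512"))] := rfl

theorem prefixTypes_eq : pvPrefixTypes = PySem.Dict.mk
    [(['$','2','a','$'], (some "3200", "bcrypt")), (['$','2','b','$'], (some "3200", "bcrypt")),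
     (['$','2','y','$'], (some "3200", "bcrypt")), (['$','6','$'], (some "1800", "sha512crypt")),
     (['$','5','$'], (some "7400", "sha256crypt")), (['$','1','$'], (some "500", "md5crypt"))] := rfl

-- ===== VERDICT (by name: the statement is the Claim_ definition above) =====
theorem detect_hash_type_spec : Claim_equal_detect_hash_type := by
  intro s _
  unfold Spec_detect_hash_type
  simp only [detect_hash_type, detect_hash_type_alt]
  have hscan := scan_eq s.toList 0 true false []
  simp only [Nat.cast_zero, zero_add, Bool.true_and, Bool.false_or, List.nil_append, Nat.sub_zero] at hscan
  rw [hscan]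
  simp only [ntlm_cond]
  have hsl : PySem.List.slice (s.toList.take 4) none (some 3) = s.toList.take 3 := by
    rw [PySem.List.slice_to _ (by norm_num)]
    norm_num [List.take_take]; rfl
  simp only [colon_any, lenTypes_eq, prefixTypes_eq, PySem.Str.len,
    PySem.Str.startswith, sw_take, PySem.Dict.get?_mk_cons, beq_iff_eq, hsl,
    show ("$2a$".toList) = ['$','2','a','$'] from rfl, show ("$2b$".toList) = ['$','2','b','$'] from rfl,
    show ("$2y$".toList) = ['$','2','y','$'] from rfl, show ("$6$".toList) = ['$','6','$'] from rfl,
    show ("$5$".toList) = ['$','5','$'] from rfl, show ("$1$".toList) = ['$','1','$'] from rfl,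
    show (['$','2','a','$'] : List Char).length = 4 from rfl, show (['$','2','b','$'] : List Char).length = 4 from rfl,
    show (['$','2','y','$'] : List Char).length = 4 from rfl, show (['$','6','$'] : List Char).length = 3 from rfl,
    show (['$','5','$'] : List Char).length = 3 from rfl, show (['$','1','$'] : List Char).length = 3 from rfl,
    show (fun c => PySem.Str.isIn (String.ofList [c]) "0123456789abcdefABCDEF") = pvIsHex from rfl,
    Bool.and_eq_true, Bool.or_eq_true]
  clear hscan hsl
  generalize s.toList = l
  by_cases hall : (l.all pvIsHex) = true
  · by_cases h32 : ((l.length : Int) = 32)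
    · simp [hall, h32]
    · by_cases h40 : ((l.length : Int) = 40)
      · simp [hall, h32, Ne.symm h32, h40]
      · by_cases h64 : ((l.length : Int) = 64)
        · simp [hall, h32, Ne.symm h32, h40, Ne.symm h40, h64]
        · by_cases h128 : ((l.length : Int) = 128)
          · simp [hall, h32, Ne.symm h32, h40, Ne.symm h40, h64, Ne.symm h64, h128]
          · simp only [hall, and_true, if_true, if_neg h32, if_neg h40, if_neg h64, if_neg h128,
              if_neg (Ne.symm h32), if_neg (Ne.symm h40), if_neg (Ne.symm h64), if_neg (Ne.symm h128),
              PySem.Dict.get?]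
            by_cases e2a : List.take 4 l = ['$','2','a','$']
            · simp [e2a]
            · by_cases e2b : List.take 4 l = ['$','2','b','$']
              · simp [e2a, Ne.symm e2a, e2b]
              · by_cases e2y : List.take 4 l = ['$','2','y','$']
                · simp [e2a, e2b, Ne.symm e2a, Ne.symm e2b, e2y]
                · by_cases e6 : List.take 3 l = ['$','6','$']
                  · by_cases e64 : List.take 4 l = ['$','6','$']
                    · simp [e2a, e2b, e2y, Ne.symm e2a, Ne.symm e2b, Ne.symm e2y, e64, e6]
                    · have h54 : List.take 4 l ≠ ['$','5','$'] := fun h => by simp [take43 l _ rfl h] at e6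
                      have h14 : List.take 4 l ≠ ['$','1','$'] := fun h => by simp [take43 l _ rfl h] at e6
                      simp [e2a, e2b, e2y, Ne.symm e2a, Ne.symm e2b, Ne.symm e2y, Ne.symm e64, Ne.symm h54, Ne.symm h14,
                        e6, PySem.Dict.get?]
                  · by_cases e5 : List.take 3 l = ['$','5','$']
                    · have h64 : List.take 4 l ≠ ['$','6','$'] := fun h => e6 (take43 l _ rfl h)
                      by_cases e54 : List.take 4 l = ['$','5','$']
                      · simp [e2a, e2b, e2y, Ne.symm e2a, Ne.symm e2b, Ne.symm e2y, Ne.symm h64, e54, e6, e5]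
                      · have h14 : List.take 4 l ≠ ['$','1','$'] := fun h => by simp [take43 l _ rfl h] at e5
                        simp [e2a, e2b, e2y, Ne.symm e2a, Ne.symm e2b, Ne.symm e2y, Ne.symm h64, Ne.symm e54, Ne.symm h14,
                          e6, e5, PySem.Dict.get?]
                    · by_cases e1 : List.take 3 l = ['$','1','$']
                      · have h64 : List.take 4 l ≠ ['$','6','$'] := fun h => e6 (take43 l _ rfl h)
                        have h54 : List.take 4 l ≠ ['$','5','$'] := fun h => e5 (take43 l _ rfl h)
                        by_cases e14 : List.take 4 l = ['$','1','$']
                        · simp [e2a, e2b, e2y, Ne.symm e2a, Ne.symm e2b, Ne.symm e2y, Ne.symm h64, Ne.symm h54, e14, e6, e5, e1]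
                        · simp [e2a, e2b, e2y, Ne.symm e2a, Ne.symm e2b, Ne.symm e2y, Ne.symm h64, Ne.symm h54, Ne.symm e14,
                            e6, e5, e1, PySem.Dict.get?]
                      · have h64 : List.take 4 l ≠ ['$','6','$'] := fun h => e6 (take43 l _ rfl h)
                        have h54 : List.take 4 l ≠ ['$','5','$'] := fun h => e5 (take43 l _ rfl h)
                        have h14 : List.take 4 l ≠ ['$','1','$'] := fun h => e1 (take43 l _ rfl h)
                        have hl3 : ∀ p : List Char, p.length = 4 → p ≠ List.take 3 l := by
                          intro p hp h
                          have := congrArg List.length h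
                          simp [hp, List.length_take] at this
                          omega
                        cases hc : l.any (· == ':') <;>
                          simp [e2a, e2b, e2y, Ne.symm e2a, Ne.symm e2b, Ne.symm e2y, Ne.symm h64, Ne.symm h54, Ne.symm h14,
                            hl3 ['$','2','a','$'] rfl, hl3 ['$','2','b','$'] rfl, hl3 ['$','2','y','$'] rfl,
                            e6, e5, e1, Ne.symm e6, Ne.symm e5, Ne.symm e1, PySem.Dict.get?]
  · simp only [hall, and_false, Bool.false_eq_true, if_false]
    by_cases e2a : List.take 4 l = ['$','2','a','$']
    · simp [e2a]
    · by_cases e2b : List.take 4 l = ['$','2','b','$']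
      · simp [e2a, Ne.symm e2a, e2b]
      · by_cases e2y : List.take 4 l = ['$','2','y','$']
        · simp [e2a, e2b, Ne.symm e2a, Ne.symm e2b, e2y]
        · by_cases e6 : List.take 3 l = ['$','6','$']
          · by_cases e64 : List.take 4 l = ['$','6','$']
            · simp [e2a, e2b, e2y, Ne.symm e2a, Ne.symm e2b, Ne.symm e2y, e64, e6]
            · have h54 : List.take 4 l ≠ ['$','5','$'] := fun h => by simp [take43 l _ rfl h] at e6
              have h14 : List.take 4 l ≠ ['$','1','$'] := fun h => by simp [take43 l _ rfl h] at e6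
              simp [e2a, e2b, e2y, Ne.symm e2a, Ne.symm e2b, Ne.symm e2y, Ne.symm e64, Ne.symm h54, Ne.symm h14,
                e6, PySem.Dict.get?]
          · by_cases e5 : List.take 3 l = ['$','5','$']
            · have h64 : List.take 4 l ≠ ['$','6','$'] := fun h => e6 (take43 l _ rfl h)
              by_cases e54 : List.take 4 l = ['$','5','$']
              · simp [e2a, e2b, e2y, Ne.symm e2a, Ne.symm e2b, Ne.symm e2y, Ne.symm h64, e54, e6, e5]
              · have h14 : List.take 4 l ≠ ['$','1','$'] := fun h => by simp [take43 l _ rfl h] at e5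
                simp [e2a, e2b, e2y, Ne.symm e2a, Ne.symm e2b, Ne.symm e2y, Ne.symm h64, Ne.symm e54, Ne.symm h14,
                  e6, e5, PySem.Dict.get?]
            · by_cases e1 : List.take 3 l = ['$','1','$']
              · have h64 : List.take 4 l ≠ ['$','6','$'] := fun h => e6 (take43 l _ rfl h)
                have h54 : List.take 4 l ≠ ['$','5','$'] := fun h => e5 (take43 l _ rfl h)
                by_cases e14 : List.take 4 l = ['$','1','$']
                · simp [e2a, e2b, e2y, Ne.symm e2a, Ne.symm e2b, Ne.symm e2y, Ne.symm h64, Ne.symm h54, e14, e6, e5, e1]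
                · simp [e2a, e2b, e2y, Ne.symm e2a, Ne.symm e2b, Ne.symm e2y, Ne.symm h64, Ne.symm h54, Ne.symm e14,
                    e6, e5, e1, PySem.Dict.get?]
              · have h64 : List.take 4 l ≠ ['$','6','$'] := fun h => e6 (take43 l _ rfl h)
                have h54 : List.take 4 l ≠ ['$','5','$'] := fun h => e5 (take43 l _ rfl h)
                have h14 : List.take 4 l ≠ ['$','1','$'] := fun h => e1 (take43 l _ rfl h)
                have hl3 : ∀ p : List Char, p.length = 4 → p ≠ List.take 3 l := by
                  intro p hp h
                  have := congrArg List.length h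
                  simp [hp, List.length_take] at this
                  omega
                cases hc : l.any (· == ':') <;>
                  simp [e2a, e2b, e2y, Ne.symm e2a, Ne.symm e2b, Ne.symm e2y, Ne.symm h64, Ne.symm h54, Ne.symm h14,
                    hl3 ['$','2','a','$'] rfl, hl3 ['$','2','b','$'] rfl, hl3 ['$','2','y','$'] rfl,
                    e6, e5, e1, Ne.symm e6, Ne.symm e5, Ne.symm e1, PySem.Dict.get?]
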